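-- pv_equiv track=rewrite | github.com/Redlnn/genshin-lyre-auto-play-without-midi | main.py | nmn_converter
-- ===== SOURCE A (Python) =====
-- music_score_map = {
--     '+1': 'Q',
--     '+2': 'W',
--     '+3': 'E',
--     '+4': 'R',
--     '+5': 'T',
--     '+6': 'Y',
--     '+7': 'U',
--     '-1': 'Z',
--     '-2': 'X',
--     '-3': 'C',
--     '-4': 'V',
--     '-5': 'B',
--     '-6': 'N',
--     '-7': 'M',
--     '1': 'A',
--     '2': 'S',
--     '3': 'D',
--     '4': 'F',
--     '5': 'G',
--     '6': 'H',
--     '7': 'J',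
-- }
--
-- def nmn_converter(nmn: str) -> str:
--     """
--     简谱（手机谱）转换为键盘按键
--
--     :param nmn: 简谱音符/音符组合
--     :return: 转换结果
--     """
--     if len(nmn) == 1:
--         return music_score_map[nmn]
--     else:
--         result = nmn
--         for i, j in music_score_map.items():
--             result = result.replace(i, j)
--         return result
-- ===== SOURCE B (Python) =====
-- _HIGH = 'QWERTYU'
-- _MID = 'ASDFGHJ'
-- _LOW = 'ZXCVBNM'
--
--
-- def nmn_converter(nmn: str) -> str:
--     """Single left-to-right scan: a '+'/'-' followed by a digit 1-7 consumes two
--     characters and maps to the high/low row, a lone digit maps to the middle row,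
--     anything else passes through unchanged."""
--     out = []
--     i, n = 0, len(nmn)
--     while i < n:
--         c = nmn[i]
--         if c in '+-' and i + 1 < n and '1' <= nmn[i + 1] <= '7':
--             out.append((_HIGH if c == '+' else _LOW)[ord(nmn[i + 1]) - 49])
--             i += 2
--         else:
--             out.append(_MID[ord(c) - 49] if '1' <= c <= '7' else c)
--             i += 1
--     return ''.join(out)
-- ===== Notes on version B (the rewrite author's own statement) =====
-- stated objective: alternative
-- what changed: Replaces A's special single-char dict lookup plus 21 sequential str.replace passes by one uniform left-to-right scan that consumes a sign+digit pair (2 chars) or a lone digit (1 char) per step and maps it to its key row by character arithmetic, with no dict and no length guard.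
import Mathlib
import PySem

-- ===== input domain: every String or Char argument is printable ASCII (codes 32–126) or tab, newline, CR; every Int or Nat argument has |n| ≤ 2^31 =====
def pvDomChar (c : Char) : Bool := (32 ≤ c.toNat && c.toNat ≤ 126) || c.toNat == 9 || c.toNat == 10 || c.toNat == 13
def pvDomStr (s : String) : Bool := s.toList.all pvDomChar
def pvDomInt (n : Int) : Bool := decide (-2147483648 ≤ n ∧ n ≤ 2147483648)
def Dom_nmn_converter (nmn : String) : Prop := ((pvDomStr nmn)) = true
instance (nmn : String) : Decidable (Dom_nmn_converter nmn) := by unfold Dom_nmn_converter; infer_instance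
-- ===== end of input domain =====

-- B replaces A's single-char dict lookup plus 21 sequential str.replace passes by one uniform
-- left-to-right scan mapping sign+digit pairs and lone digits by character arithmetic
-- (objective: alternative, single pass; return value only, no side effects involved).

-- ===== PORT A =====
def pvMusicScoreMap : PySem.Dict String String := PySem.Dict.ofList
  [("+1", "Q"), ("+2", "W"), ("+3", "E"), ("+4", "R"), ("+5", "T"), ("+6", "Y"), ("+7", "U"),
   ("-1", "Z"), ("-2", "X"), ("-3", "C"), ("-4", "V"), ("-5", "B"), ("-6", "N"), ("-7", "M"),
   ("1", "A"), ("2", "S"), ("3", "D"), ("4", "F"), ("5", "G"), ("6", "H"), ("7", "J")]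

def nmn_converter (nmn : String) : String :=
  if PySem.Str.len nmn = 1 then
    -- music_score_map[nmn]: the KeyError case (absent key) is excluded by Pre_; the default is never read there
    (pvMusicScoreMap.get? nmn).getD ""
  else
    (pvMusicScoreMap.items).foldl (fun result ij => PySem.Str.replace result ij.1 ij.2) nmn

-- ===== PORT B =====
def pvHigh : List Char := ['Q', 'W', 'E', 'R', 'T', 'Y', 'U']
def pvMid  : List Char := ['A', 'S', 'D', 'F', 'G', 'H', 'J']
def pvLow  : List Char := ['Z', 'X', 'C', 'V', 'B', 'N', 'M']

-- '1' <= c <= '7' test of Source B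
def pvIsDig (c : Char) : Bool := decide ('1' ≤ c ∧ c ≤ '7')

-- the while loop of Source B: one step consumes 2 chars (sign+digit, ord arithmetic) or 1 char;
-- the last-character case has no lookahead (i+1 < n fails in Source B)
def pvScan : List Char → List Char
  | [] => []
  | [c] => [if pvIsDig c then pvMid.getD (c.toNat - 49) ' ' else c]
  | c :: d :: t =>
    if (c = '+' ∨ c = '-') ∧ pvIsDig d then
      (if c = '+' then pvHigh else pvLow).getD (d.toNat - 49) ' ' :: pvScan t
    else
      (if pvIsDig c then pvMid.getD (c.toNat - 49) ' ' else c) :: pvScan (d :: t)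

def nmn_converter_alt (nmn : String) : String := String.ofList (pvScan nmn.toList)

-- ===== PRECONDITION & SPEC =====
-- Pre_ excludes only the inputs on which A RAISES: single-character strings other than '1'..'7',
-- where music_score_map[nmn] raises KeyError (B returns the character unchanged there).
def Pre_nmn_converter (nmn : String) : Prop :=
  PySem.Str.len nmn = 1 → ('1' ≤ nmn.toList.headD ' ' ∧ nmn.toList.headD ' ' ≤ '7')
instance (nmn : String) : Decidable (Pre_nmn_converter nmn) := by unfold Pre_nmn_converter; infer_instance

def pvWitness_nmn_converter : String := "1+2-3"

def Spec_nmn_converter (nmn : String) (out : String) : Prop := out = nmn_converter_alt nmn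
instance (nmn : String) (out : String) : Decidable (Spec_nmn_converter nmn out) := by unfold Spec_nmn_converter; infer_instance

-- ===== CLAIM (what is proved, stated in full; the proofs are below) =====
def Claim_equal_nmn_converter : Prop := ∀ (nmn : String), Dom_nmn_converter nmn → Pre_nmn_converter nmn → Spec_nmn_converter nmn (nmn_converter nmn)

-- ===== LEMMAS AND PROOFS =====

-- fuel-free form of Python's non-overlapping left-to-right replace, for a nonempty pattern
-- replaced by a single character (every pattern of music_score_map has this shape)
def repF (old : List Char) (r : Char) : List Char → List Char
  | [] => []
  | c :: t => if old.isPrefixOf (c :: t) then r :: repF old r (t.drop (old.length - 1))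
              else c :: repF old r t
  termination_by l => l.length
  decreasing_by all_goals (simp; try omega)

-- the 21 (pattern, replacement) pairs, in A's dict order
def pats : List (List Char × Char) :=
  [(['+','1'],'Q'), (['+','2'],'W'), (['+','3'],'E'), (['+','4'],'R'), (['+','5'],'T'),
   (['+','6'],'Y'), (['+','7'],'U'),
   (['-','1'],'Z'), (['-','2'],'X'), (['-','3'],'C'), (['-','4'],'V'), (['-','5'],'B'),
   (['-','6'],'N'), (['-','7'],'M'),
   (['1'],'A'), (['2'],'S'), (['3'],'D'), (['4'],'F'), (['5'],'G'), (['6'],'H'), (['7'],'J')]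

def Gf (ps : List (List Char × Char)) (l : List Char) : List Char :=
  ps.foldl (fun acc p => repF p.1 p.2 acc) l

def pvInertB (c : Char) : Bool := !(c == '+') && !(c == '-') && !(pvIsDig c)

def patOKb (p : List Char × Char) : Bool :=
  match p with
  | ([s, d], r) => (s == '+' || s == '-') && pvIsDig d && pvInertB r
  | ([d], r) => pvIsDig d && pvInertB r
  | _ => false

def pat2b (p : List Char × Char) : Bool :=
  match p with
  | ([_, _], _) => patOKb p
  | _ => false

lemma allPatOK : ∀ p ∈ pats, patOKb p = true := by decide

lemma char_eq_of_toNat (a b : Char) (h : a.toNat = b.toNat) : a = b :=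
  Char.ext (UInt32.toNat_inj.mp h)

lemma digit_enum (d : Char) (h1 : '1' ≤ d) (h2 : d ≤ '7') :
    d = '1' ∨ d = '2' ∨ d = '3' ∨ d = '4' ∨ d = '5' ∨ d = '6' ∨ d = '7' := by
  have l1 : 49 ≤ d.toNat := h1
  have l2 : d.toNat ≤ 55 := h2
  have h : d.toNat = 49 ∨ d.toNat = 50 ∨ d.toNat = 51 ∨ d.toNat = 52 ∨ d.toNat = 53 ∨
      d.toNat = 54 ∨ d.toNat = 55 := by omega
  rcases h with h | h | h | h | h | h | h
  · exact Or.inl (char_eq_of_toNat _ _ h)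
  · exact Or.inr (Or.inl (char_eq_of_toNat _ _ h))
  · exact Or.inr (Or.inr (Or.inl (char_eq_of_toNat _ _ h)))
  · exact Or.inr (Or.inr (Or.inr (Or.inl (char_eq_of_toNat _ _ h))))
  · exact Or.inr (Or.inr (Or.inr (Or.inr (Or.inl (char_eq_of_toNat _ _ h)))))
  · exact Or.inr (Or.inr (Or.inr (Or.inr (Or.inr (Or.inl (char_eq_of_toNat _ _ h))))))
  · exact Or.inr (Or.inr (Or.inr (Or.inr (Or.inr (Or.inr (char_eq_of_toNat _ _ h))))))

lemma isdig_parts (d : Char) (h : pvIsDig d = true) : '1' ≤ d ∧ d ≤ '7' :=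
  of_decide_eq_true h

lemma inert_parts (r : Char) (h : pvInertB r = true) :
    r ≠ '+' ∧ r ≠ '-' ∧ pvIsDig r = false := by
  have h' : (!(r == '+') && !(r == '-') && !(pvIsDig r)) = true := h
  simp only [Bool.and_eq_true, Bool.not_eq_true', beq_eq_false_iff_ne] at h'
  exact ⟨h'.1.1, h'.1.2, h'.2⟩

lemma patOK2_parts (s d r : Char) (h : patOKb ([s, d], r) = true) :
    (s = '+' ∨ s = '-') ∧ pvIsDig d = true ∧ pvInertB r = true := by
  have h' : ((s == '+' || s == '-') && pvIsDig d && pvInertB r) = true := h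
  simp only [Bool.and_eq_true, Bool.or_eq_true, beq_iff_eq] at h'
  exact ⟨h'.1.1, h'.1.2, h'.2⟩

lemma patOK1_parts (d r : Char) (h : patOKb ([d], r) = true) :
    pvIsDig d = true ∧ pvInertB r = true := by
  have h' : (pvIsDig d && pvInertB r) = true := h
  simp only [Bool.and_eq_true] at h'
  exact h'

lemma sign_not_dig (s : Char) (hs : s = '+' ∨ s = '-') (d : Char) (hd : pvIsDig d = true) :
    s ≠ d := by
  intro h
  rw [← h] at hd
  rcases hs with h' | h' <;> rw [h'] at hd <;> exact absurd hd (by decide)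

-- Chars.replace with a nonempty pattern and a single-char replacement is repF
lemma go_eq_repF (o : Char) (os : List Char) (r : Char) :
    ∀ fuel l acc, l.length ≤ fuel →
      PySem.Chars.replace.go (o :: os) [r] fuel l acc = acc.reverse ++ repF (o :: os) r l := by
  intro fuel
  induction fuel with
  | zero =>
    intro l acc h
    have hl : l = [] := by cases l <;> simp_all
    subst hl
    simp [PySem.Chars.replace.go, repF]
  | succ n ih =>
    intro l acc h
    cases l with
    | nil => simp [PySem.Chars.replace.go, repF]
    | cons c t =>
      rw [PySem.Chars.replace.go]
      by_cases hp : (o :: os).isPrefixOf (c :: t) = true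
      · simp only [hp, if_pos]
        rw [ih _ _ (by simp at h ⊢; omega)]
        have hdrop : List.drop (o :: os).length (c :: t) = t.drop ((o :: os).length - 1) := by
          simp
        rw [hdrop, repF, if_pos hp]
        simp
      · have hp' : (o :: os).isPrefixOf (c :: t) = false := by
          simp only [Bool.not_eq_true] at hp; exact hp
        rw [if_neg (by simp [hp'])]
        rw [ih _ _ (by simp at h ⊢; omega)]
        rw [repF, if_neg (by simp [hp'])]
        simp

lemma replace_eq_repF (o : Char) (os : List Char) (r : Char) (s : List Char) :
    PySem.Chars.replace s (o :: os) [r] = repF (o :: os) r s := by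
  rw [PySem.Chars.replace]
  simp only [List.isEmpty_cons, if_neg Bool.false_ne_true]
  simpa using go_eq_repF o os r s.length s [] le_rfl

-- cons lemmas for repF
lemma repF_nil (old : List Char) (r : Char) : repF old r [] = [] := by simp [repF]

lemma repF_cons_nomatch (old : List Char) (r c : Char) (t : List Char)
    (h : old.isPrefixOf (c :: t) = false) : repF old r (c :: t) = c :: repF old r t := by
  rw [repF, if_neg (by simp [h])]

lemma repF_match2 (s d r : Char) (t : List Char) :
    repF [s, d] r (s :: d :: t) = r :: repF [s, d] r t := by
  rw [repF, if_pos (by simp [List.isPrefixOf])]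
  simp

lemma repF_match1 (d r : Char) (t : List Char) :
    repF [d] r (d :: t) = r :: repF [d] r t := by
  rw [repF, if_pos (by simp [List.isPrefixOf])]
  simp

-- every pattern of pats rewrites to a non-digit letter, so a non-digit head stays non-digit
lemma repF_head_notdig (p : List Char × Char) (hp : patOKb p = true) (l : List Char)
    (h : pvIsDig (l.headD ' ') = false) :
    pvIsDig ((repF p.1 p.2 l).headD ' ') = false := by
  obtain ⟨pl, r⟩ := p
  have hr : pvIsDig r = false := by
    match pl with
    | [s, d] => exact (inert_parts r (patOK2_parts s d r hp).2.2).2.2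
    | [d] => exact (inert_parts r (patOK1_parts d r hp).2).2.2
    | [] => simp [patOKb] at hp
    | _ :: _ :: _ :: _ => simp [patOKb] at hp
  cases l with
  | nil => simpa [repF_nil] using h
  | cons c t =>
    by_cases hpre : pl.isPrefixOf (c :: t) = true
    · rw [repF, if_pos hpre]; simpa using hr
    · rw [repF_cons_nomatch _ _ _ _ (by simp only [Bool.not_eq_true] at hpre; exact hpre)]
      simpa using h

lemma Gf_nil (ps : List (List Char × Char)) : Gf ps [] = [] := by
  induction ps with
  | nil => rfl
  | cons p ps ih =>
    show Gf ps (repF p.1 p.2 []) = []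
    rw [repF_nil]; exact ih

lemma Gf_append (a b : List (List Char × Char)) (l : List Char) :
    Gf (a ++ b) l = Gf b (Gf a l) := by
  simp [Gf, List.foldl_append]

-- skip lemma: patterns whose first character differs from the head commute with cons
lemma G_cons_skip (c : Char) :
    ∀ ps, (∀ p ∈ ps, patOKb p = true ∧ p.1.headD ' ' ≠ c) →
      ∀ u, Gf ps (c :: u) = c :: Gf ps u := by
  intro ps
  induction ps with
  | nil => intro _ u; rfl
  | cons p ps ih =>
    intro hps u
    obtain ⟨hok, hhd⟩ := hps p (by simp)
    have hstep : repF p.1 p.2 (c :: u) = c :: repF p.1 p.2 u := by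
      apply repF_cons_nomatch
      obtain ⟨pl, r⟩ := p
      match pl with
      | [] => simp [patOKb] at hok
      | a :: rest =>
        simp only [List.isPrefixOf]
        have : a ≠ c := by simpa using hhd
        simp [this]
    show Gf ps (repF p.1 p.2 (c :: u)) = c :: Gf ps (repF p.1 p.2 u)
    rw [hstep]
    exact ih (fun q hq => hps q (by simp [hq])) _

-- two-char patterns other than [s,d] commute with the cons of s :: d
lemma G_cons2_skip (s d : Char) (hs : s = '+' ∨ s = '-') (hd : pvIsDig d = true) :
    ∀ ps, (∀ p ∈ ps, pat2b p = true ∧ p.1 ≠ [s, d]) →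
      ∀ u, Gf ps (s :: d :: u) = s :: d :: Gf ps u := by
  intro ps
  induction ps with
  | nil => intro _ u; rfl
  | cons p ps ih =>
    intro hps u
    obtain ⟨hok, hne⟩ := hps p (by simp)
    obtain ⟨pl, r⟩ := p
    match pl with
    | [s', d'] =>
      have hok' := patOK2_parts s' d' r hok
      have hstep : repF [s', d'] r (s :: d :: u) = s :: d :: repF [s', d'] r u := by
        have h1 : ¬(s' = s ∧ d' = d) := by
          intro ⟨e1, e2⟩; exact hne (by rw [e1, e2])
        rw [repF_cons_nomatch _ _ _ _ (by
          simp only [List.isPrefixOf, Bool.and_eq_false_iff]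
          by_cases e1 : s' = s
          · subst e1
            have e2 : d' ≠ d := fun h => h1 ⟨rfl, h⟩
            simp [e2]
          · simp [e1])]
        rw [repF_cons_nomatch _ _ _ _ (by
          have : s' ≠ d := sign_not_dig s' hok'.1 d hd
          simp [List.isPrefixOf, this])]
      show Gf ps (repF [s', d'] r (s :: d :: u)) = s :: d :: Gf ps (repF [s', d'] r u)
      rw [hstep]
      exact ih (fun q hq => hps q (by simp [hq])) _
    | [] => simp [pat2b] at hok
    | [_] => simp [pat2b] at hok
    | _ :: _ :: _ :: _ => simp [pat2b] at hok

-- a sign followed by a non-digit commutes with every pattern (the non-digit head is preserved)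
lemma G_cons_sign_skip (c : Char) (hc : c = '+' ∨ c = '-') :
    ∀ ps, (∀ p ∈ ps, patOKb p = true) →
      ∀ u, pvIsDig (u.headD ' ') = false → Gf ps (c :: u) = c :: Gf ps u := by
  intro ps
  induction ps with
  | nil => intro _ u _; rfl
  | cons p ps ih =>
    intro hps u hu
    have hok := hps p (by simp)
    obtain ⟨pl, r⟩ := p
    have hstep : repF pl r (c :: u) = c :: repF pl r u := by
      apply repF_cons_nomatch
      match pl with
      | [s', d'] =>
        have hd' : pvIsDig d' = true := (patOK2_parts s' d' r hok).2.1
        by_cases e1 : s' = c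
        · cases u with
          | nil => simp [List.isPrefixOf]
          | cons y u' =>
            have hne : d' ≠ y := by
              intro h
              rw [h] at hd'
              simp only [List.headD] at hu
              rw [hd'] at hu
              exact absurd hu (by simp)
            simp [List.isPrefixOf, hne]
        · simp [List.isPrefixOf, e1]
      | [d'] =>
        have hd' : pvIsDig d' = true := (patOK1_parts d' r hok).1
        have hne : d' ≠ c := fun h => sign_not_dig c hc d' hd' h.symm
        simp [List.isPrefixOf, hne]
      | [] => simp [patOKb] at hok
      | _ :: _ :: _ :: _ => simp [patOKb] at hok
    show Gf ps (repF pl r (c :: u)) = c :: Gf ps (repF pl r u)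
    rw [hstep]
    exact ih (fun q hq => hps q (by simp [hq])) _
      (repF_head_notdig (pl, r) hok u hu)

lemma head_ne_of_inert (p : List Char × Char) (hp : patOKb p = true) (r : Char)
    (hr : pvInertB r = true) : p.1.headD ' ' ≠ r := by
  obtain ⟨pl, q⟩ := p
  have hrP := inert_parts r hr
  match pl with
  | [s', d'] =>
    simp only [List.headD]
    rcases (patOK2_parts s' d' q hp).1 with h | h <;> subst h
    · exact fun e => hrP.1 e.symm
    · exact fun e => hrP.2.1 e.symm
  | [d'] =>
    simp only [List.headD]
    intro e
    have hd' : pvIsDig d' = true := (patOK1_parts d' q hp).1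
    rw [e] at hd'
    rw [hrP.2.2] at hd'
    exact absurd hd' (by simp)
  | [] => simp [patOKb] at hp
  | _ :: _ :: _ :: _ => simp [patOKb] at hp

-- unfolding pvScan one character at a time, for an arbitrary tail
lemma pvScan_cons_inert (c : Char) (h1 : ¬(c = '+' ∨ c = '-')) (h2 : pvIsDig c = false)
    (t : List Char) : pvScan (c :: t) = c :: pvScan t := by
  cases t <;> simp [pvScan, h1, h2]

lemma pvScan_cons_dig (c : Char) (hc : pvIsDig c = true) (hns : ¬(c = '+' ∨ c = '-'))
    (t : List Char) : pvScan (c :: t) = pvMid.getD (c.toNat - 49) ' ' :: pvScan t := by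
  cases t <;> simp [pvScan, hc, hns]

-- assembling: one two-char pattern fires
lemma G_two (s d r : Char) (pre post : List (List Char × Char))
    (hsp : pats = pre ++ ([s, d], r) :: post)
    (hpre : ∀ p ∈ pre, pat2b p = true ∧ p.1 ≠ [s, d])
    (hs : s = '+' ∨ s = '-') (hd : pvIsDig d = true) (hr : pvInertB r = true) (t : List Char) :
    Gf pats (s :: d :: t) = r :: Gf pats t := by
  have hpost : ∀ p ∈ post, patOKb p = true := by
    intro p hp; exact allPatOK p (by rw [hsp]; simp [hp])
  rw [hsp, Gf_append, Gf_append]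
  show Gf post (repF [s, d] r (Gf pre (s :: d :: t))) = r :: Gf post (repF [s, d] r (Gf pre t))
  rw [G_cons2_skip s d hs hd pre hpre t, repF_match2]
  exact G_cons_skip r post
    (fun p hp => ⟨hpost p hp, head_ne_of_inert p (hpost p hp) r hr⟩) _

-- assembling: one single-digit pattern fires
lemma G_one (d r : Char) (pre post : List (List Char × Char))
    (hsp : pats = pre ++ ([d], r) :: post)
    (hpre : ∀ p ∈ pre, patOKb p = true ∧ p.1.headD ' ' ≠ d)
    (hr : pvInertB r = true) (t : List Char) :
    Gf pats (d :: t) = r :: Gf pats t := by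
  have hpost : ∀ p ∈ post, patOKb p = true := by
    intro p hp; exact allPatOK p (by rw [hsp]; simp [hp])
  rw [hsp, Gf_append, Gf_append]
  show Gf post (repF [d] r (Gf pre (d :: t))) = r :: Gf post (repF [d] r (Gf pre t))
  rw [G_cons_skip d pre hpre t, repF_match1]
  exact G_cons_skip r post
    (fun p hp => ⟨hpost p hp, head_ne_of_inert p (hpost p hp) r hr⟩) _

-- the core: the 21 replace passes equal the single scan, on every character list
theorem core : ∀ (l : List Char), Gf pats l = pvScan l
  | [] => by rw [Gf_nil]; simp [pvScan]
  | c :: t => by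
    by_cases hsign : c = '+' ∨ c = '-'
    · cases t with
      | nil =>
        rw [G_cons_sign_skip c hsign pats allPatOK [] (by decide), Gf_nil]
        rcases hsign with h | h <;> subst h <;> simp [pvScan, pvIsDig]
      | cons d t' =>
        by_cases hd : pvIsDig d = true
        · have hd12 := isdig_parts d hd
          rcases hsign with hsgn | hsgn <;> subst hsgn <;>
            rcases digit_enum d hd12.1 hd12.2 with h | h | h | h | h | h | h <;> subst h
          · rw [G_two '+' '1' 'Q' (pats.take 0) (pats.drop 1) rfl (by decide) (by decide) (by decide) (by decide) t', core t']
            simp [pvScan, pvIsDig, pvHigh]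
          · rw [G_two '+' '2' 'W' (pats.take 1) (pats.drop 2) rfl (by decide) (by decide) (by decide) (by decide) t', core t']
            simp [pvScan, pvIsDig, pvHigh]
          · rw [G_two '+' '3' 'E' (pats.take 2) (pats.drop 3) rfl (by decide) (by decide) (by decide) (by decide) t', core t']
            simp [pvScan, pvIsDig, pvHigh]
          · rw [G_two '+' '4' 'R' (pats.take 3) (pats.drop 4) rfl (by decide) (by decide) (by decide) (by decide) t', core t']
            simp [pvScan, pvIsDig, pvHigh]
          · rw [G_two '+' '5' 'T' (pats.take 4) (pats.drop 5) rfl (by decide) (by decide) (by decide) (by decide) t', core t']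
            simp [pvScan, pvIsDig, pvHigh]
          · rw [G_two '+' '6' 'Y' (pats.take 5) (pats.drop 6) rfl (by decide) (by decide) (by decide) (by decide) t', core t']
            simp [pvScan, pvIsDig, pvHigh]
          · rw [G_two '+' '7' 'U' (pats.take 6) (pats.drop 7) rfl (by decide) (by decide) (by decide) (by decide) t', core t']
            simp [pvScan, pvIsDig, pvHigh]
          · rw [G_two '-' '1' 'Z' (pats.take 7) (pats.drop 8) rfl (by decide) (by decide) (by decide) (by decide) t', core t']
            simp [pvScan, pvIsDig, pvLow]
          · rw [G_two '-' '2' 'X' (pats.take 8) (pats.drop 9) rfl (by decide) (by decide) (by decide) (by decide) t', core t']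
            simp [pvScan, pvIsDig, pvLow]
          · rw [G_two '-' '3' 'C' (pats.take 9) (pats.drop 10) rfl (by decide) (by decide) (by decide) (by decide) t', core t']
            simp [pvScan, pvIsDig, pvLow]
          · rw [G_two '-' '4' 'V' (pats.take 10) (pats.drop 11) rfl (by decide) (by decide) (by decide) (by decide) t', core t']
            simp [pvScan, pvIsDig, pvLow]
          · rw [G_two '-' '5' 'B' (pats.take 11) (pats.drop 12) rfl (by decide) (by decide) (by decide) (by decide) t', core t']
            simp [pvScan, pvIsDig, pvLow]
          · rw [G_two '-' '6' 'N' (pats.take 12) (pats.drop 13) rfl (by decide) (by decide) (by decide) (by decide) t', core t']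
            simp [pvScan, pvIsDig, pvLow]
          · rw [G_two '-' '7' 'M' (pats.take 13) (pats.drop 14) rfl (by decide) (by decide) (by decide) (by decide) t', core t']
            simp [pvScan, pvIsDig, pvLow]
        · have hd' : pvIsDig d = false := by simp only [Bool.not_eq_true] at hd; exact hd
          rw [G_cons_sign_skip c hsign pats allPatOK (d :: t') (by simpa using hd'), core (d :: t')]
          rcases hsign with h | h <;> subst h <;>
            simp [pvScan, hd', show pvIsDig '+' = false from by decide,
              show pvIsDig '-' = false from by decide]
    · by_cases hdig : pvIsDig c = true
      · have h12 := isdig_parts c hdig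
        rcases digit_enum c h12.1 h12.2 with h | h | h | h | h | h | h <;> subst h
        · rw [G_one '1' 'A' (pats.take 14) (pats.drop 15) rfl (by decide) (by decide) t, core t]
          rw [pvScan_cons_dig '1' (by decide) (by decide) t]
          simp [pvMid]
        · rw [G_one '2' 'S' (pats.take 15) (pats.drop 16) rfl (by decide) (by decide) t, core t]
          rw [pvScan_cons_dig '2' (by decide) (by decide) t]
          simp [pvMid]
        · rw [G_one '3' 'D' (pats.take 16) (pats.drop 17) rfl (by decide) (by decide) t, core t]
          rw [pvScan_cons_dig '3' (by decide) (by decide) t]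
          simp [pvMid]
        · rw [G_one '4' 'F' (pats.take 17) (pats.drop 18) rfl (by decide) (by decide) t, core t]
          rw [pvScan_cons_dig '4' (by decide) (by decide) t]
          simp [pvMid]
        · rw [G_one '5' 'G' (pats.take 18) (pats.drop 19) rfl (by decide) (by decide) t, core t]
          rw [pvScan_cons_dig '5' (by decide) (by decide) t]
          simp [pvMid]
        · rw [G_one '6' 'H' (pats.take 19) (pats.drop 20) rfl (by decide) (by decide) t, core t]
          rw [pvScan_cons_dig '6' (by decide) (by decide) t]
          simp [pvMid]
        · rw [G_one '7' 'J' (pats.take 20) (pats.drop 21) rfl (by decide) (by decide) t, core t]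
          rw [pvScan_cons_dig '7' (by decide) (by decide) t]
          simp [pvMid]
      · have hin : ∀ p ∈ pats, patOKb p = true ∧ p.1.headD ' ' ≠ c := by
          intro p hp
          refine ⟨allPatOK p hp, ?_⟩
          have hok := allPatOK p hp
          obtain ⟨pl, r⟩ := p
          match pl with
          | [s', d'] =>
            simp only [List.headD]
            rcases (patOK2_parts s' d' r hok).1 with h | h <;> subst h <;>
              exact fun e => hsign (by simp [← e])
          | [d'] =>
            simp only [List.headD]
            have hdd : pvIsDig d' = true := (patOK1_parts d' r hok).1
            intro e
            rw [e] at hdd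
            simp only [Bool.not_eq_true] at hdig
            rw [hdig] at hdd
            exact absurd hdd (by simp)
          | [] => simp [patOKb] at hok
          | _ :: _ :: _ :: _ => simp [patOKb] at hok
        rw [G_cons_skip c pats hin t, core t]
        have hnd : pvIsDig c = false := by simp only [Bool.not_eq_true] at hdig; exact hdig
        rw [pvScan_cons_inert c hsign hnd t]
  termination_by l => l.length
  decreasing_by all_goals (simp; try omega)

-- per-pattern forms of replace_eq_repF with A's string literals
lemma pvRep0 (s : List Char) :
    PySem.Chars.replace s ("+1" : String).toList ("Q" : String).toList = repF ['+', '1'] 'Q' s := by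
  rw [show ("+1" : String).toList = ['+', '1'] from rfl,
    show ("Q" : String).toList = ['Q'] from rfl, replace_eq_repF]

lemma pvRep1 (s : List Char) :
    PySem.Chars.replace s ("+2" : String).toList ("W" : String).toList = repF ['+', '2'] 'W' s := by
  rw [show ("+2" : String).toList = ['+', '2'] from rfl,
    show ("W" : String).toList = ['W'] from rfl, replace_eq_repF]

lemma pvRep2 (s : List Char) :
    PySem.Chars.replace s ("+3" : String).toList ("E" : String).toList = repF ['+', '3'] 'E' s := by
  rw [show ("+3" : String).toList = ['+', '3'] from rfl,
    show ("E" : String).toList = ['E'] from rfl, replace_eq_repF]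

lemma pvRep3 (s : List Char) :
    PySem.Chars.replace s ("+4" : String).toList ("R" : String).toList = repF ['+', '4'] 'R' s := by
  rw [show ("+4" : String).toList = ['+', '4'] from rfl,
    show ("R" : String).toList = ['R'] from rfl, replace_eq_repF]

lemma pvRep4 (s : List Char) :
    PySem.Chars.replace s ("+5" : String).toList ("T" : String).toList = repF ['+', '5'] 'T' s := by
  rw [show ("+5" : String).toList = ['+', '5'] from rfl,
    show ("T" : String).toList = ['T'] from rfl, replace_eq_repF]

lemma pvRep5 (s : List Char) :
    PySem.Chars.replace s ("+6" : String).toList ("Y" : String).toList = repF ['+', '6'] 'Y' s := by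
  rw [show ("+6" : String).toList = ['+', '6'] from rfl,
    show ("Y" : String).toList = ['Y'] from rfl, replace_eq_repF]

lemma pvRep6 (s : List Char) :
    PySem.Chars.replace s ("+7" : String).toList ("U" : String).toList = repF ['+', '7'] 'U' s := by
  rw [show ("+7" : String).toList = ['+', '7'] from rfl,
    show ("U" : String).toList = ['U'] from rfl, replace_eq_repF]

lemma pvRep7 (s : List Char) :
    PySem.Chars.replace s ("-1" : String).toList ("Z" : String).toList = repF ['-', '1'] 'Z' s := by
  rw [show ("-1" : String).toList = ['-', '1'] from rfl,
    show ("Z" : String).toList = ['Z'] from rfl, replace_eq_repF]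

lemma pvRep8 (s : List Char) :
    PySem.Chars.replace s ("-2" : String).toList ("X" : String).toList = repF ['-', '2'] 'X' s := by
  rw [show ("-2" : String).toList = ['-', '2'] from rfl,
    show ("X" : String).toList = ['X'] from rfl, replace_eq_repF]

lemma pvRep9 (s : List Char) :
    PySem.Chars.replace s ("-3" : String).toList ("C" : String).toList = repF ['-', '3'] 'C' s := by
  rw [show ("-3" : String).toList = ['-', '3'] from rfl,
    show ("C" : String).toList = ['C'] from rfl, replace_eq_repF]

lemma pvRep10 (s : List Char) :
    PySem.Chars.replace s ("-4" : String).toList ("V" : String).toList = repF ['-', '4'] 'V' s := by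
  rw [show ("-4" : String).toList = ['-', '4'] from rfl,
    show ("V" : String).toList = ['V'] from rfl, replace_eq_repF]

lemma pvRep11 (s : List Char) :
    PySem.Chars.replace s ("-5" : String).toList ("B" : String).toList = repF ['-', '5'] 'B' s := by
  rw [show ("-5" : String).toList = ['-', '5'] from rfl,
    show ("B" : String).toList = ['B'] from rfl, replace_eq_repF]

lemma pvRep12 (s : List Char) :
    PySem.Chars.replace s ("-6" : String).toList ("N" : String).toList = repF ['-', '6'] 'N' s := by
  rw [show ("-6" : String).toList = ['-', '6'] from rfl,
    show ("N" : String).toList = ['N'] from rfl, replace_eq_repF]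

lemma pvRep13 (s : List Char) :
    PySem.Chars.replace s ("-7" : String).toList ("M" : String).toList = repF ['-', '7'] 'M' s := by
  rw [show ("-7" : String).toList = ['-', '7'] from rfl,
    show ("M" : String).toList = ['M'] from rfl, replace_eq_repF]

lemma pvRep14 (s : List Char) :
    PySem.Chars.replace s ("1" : String).toList ("A" : String).toList = repF ['1'] 'A' s := by
  rw [show ("1" : String).toList = ['1'] from rfl,
    show ("A" : String).toList = ['A'] from rfl, replace_eq_repF]

lemma pvRep15 (s : List Char) :
    PySem.Chars.replace s ("2" : String).toList ("S" : String).toList = repF ['2'] 'S' s := by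
  rw [show ("2" : String).toList = ['2'] from rfl,
    show ("S" : String).toList = ['S'] from rfl, replace_eq_repF]

lemma pvRep16 (s : List Char) :
    PySem.Chars.replace s ("3" : String).toList ("D" : String).toList = repF ['3'] 'D' s := by
  rw [show ("3" : String).toList = ['3'] from rfl,
    show ("D" : String).toList = ['D'] from rfl, replace_eq_repF]

lemma pvRep17 (s : List Char) :
    PySem.Chars.replace s ("4" : String).toList ("F" : String).toList = repF ['4'] 'F' s := by
  rw [show ("4" : String).toList = ['4'] from rfl,
    show ("F" : String).toList = ['F'] from rfl, replace_eq_repF]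

lemma pvRep18 (s : List Char) :
    PySem.Chars.replace s ("5" : String).toList ("G" : String).toList = repF ['5'] 'G' s := by
  rw [show ("5" : String).toList = ['5'] from rfl,
    show ("G" : String).toList = ['G'] from rfl, replace_eq_repF]

lemma pvRep19 (s : List Char) :
    PySem.Chars.replace s ("6" : String).toList ("H" : String).toList = repF ['6'] 'H' s := by
  rw [show ("6" : String).toList = ['6'] from rfl,
    show ("H" : String).toList = ['H'] from rfl, replace_eq_repF]

lemma pvRep20 (s : List Char) :
    PySem.Chars.replace s ("7" : String).toList ("J" : String).toList = repF ['7'] 'J' s := by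
  rw [show ("7" : String).toList = ['7'] from rfl,
    show ("J" : String).toList = ['J'] from rfl, replace_eq_repF]

lemma portA_else (nmn : String) :
    ((pvMusicScoreMap.items).foldl (fun result ij => PySem.Str.replace result ij.1 ij.2)
      nmn).toList = Gf pats nmn.toList := by
  rw [show pvMusicScoreMap.items = [("+1", "Q"), ("+2", "W"), ("+3", "E"), ("+4", "R"), ("+5", "T"), ("+6", "Y"), ("+7", "U"), ("-1", "Z"), ("-2", "X"), ("-3", "C"), ("-4", "V"), ("-5", "B"), ("-6", "N"), ("-7", "M"), ("1", "A"), ("2", "S"), ("3", "D"), ("4", "F"), ("5", "G"), ("6", "H"), ("7", "J")] from rfl]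
  simp only [List.foldl_cons, List.foldl_nil]
  simp only [PySem.Str.toList_replace]
  simp only [pvRep0, pvRep1, pvRep2, pvRep3, pvRep4, pvRep5, pvRep6, pvRep7, pvRep8, pvRep9, pvRep10, pvRep11, pvRep12, pvRep13, pvRep14, pvRep15, pvRep16, pvRep17, pvRep18, pvRep19, pvRep20]
  rfl

lemma toList_single (nmn : String) (h : PySem.Str.len nmn = 1) :
    nmn.toList = [nmn.toList.headD ' '] := by
  have hl : nmn.toList.length = 1 := by
    rw [PySem.Str.len] at h
    exact_mod_cast h
  cases hc : nmn.toList with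
  | nil => rw [hc] at hl; simp at hl
  | cons c t =>
    rw [hc] at hl
    simp at hl
    simp [hl]

-- ===== VERDICT (by name: the statement is the Claim_ definition above) =====
theorem nmn_converter_spec : Claim_equal_nmn_converter := by
  intro nmn hdom hpre
  show nmn_converter nmn = nmn_converter_alt nmn
  by_cases hl : PySem.Str.len nmn = 1
  · have hsingle := toList_single nmn hl
    have hdig := hpre hl
    have hs : nmn = String.ofList [nmn.toList.headD ' '] := by
      apply String.toList_inj.mp; simpa using hsingle
    rcases digit_enum _ hdig.1 hdig.2 with h | h | h | h | h | h | h <;>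
      rw [hs, h] <;> decide
  · rw [nmn_converter, if_neg hl]
    apply String.toList_inj.mp
    rw [portA_else nmn, core]
    simp [nmn_converter_alt]
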